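-- pv_equiv track=rewrite | github.com/juliasaveliff/NLP-modified-markov | mtg-simple.py | finish_sentence
-- ===== SOURCE A (Python) =====
-- def finish_sentence(sentence, n, corpus, max_length=15):
-- 	# sentence: String[]
-- 	# n: int
-- 	# corpus: String[]
--
-- 	corpus = [word.lower() for word in corpus]
--
-- 	pattern = sentence[-(n-1):]
-- 	output = []
-- 	for item in pattern:
-- 		output.append(item)
--
-- 	# Stop when generated sentence has max length
-- 	while (len(output) + len (sentence[:-(n-1)])) < max_length:
-- 		frequency={}
--
-- 		for i in range(n,len(corpus)-1):
-- 			if pattern ==corpus[(i-n+1):i]: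
-- 				next_word = corpus[i]
--
-- 				if next_word not in frequency:
-- 					frequency[next_word] = 0
-- 				frequency[next_word]+=1
-- 		next = ""
-- 		max_freq = 0
-- 		for value in frequency.keys():
-- 			if frequency[value]>max_freq:
-- 				max_freq = frequency[value]
-- 				next = value
--
-- 		if (n==2):
-- 			pattern = []
-- 		else:
-- 			pattern = pattern[-(n-2):]
--
-- 		pattern.append(next);
--
-- 		output.append(next);
-- 		end = [".","!","?"]
-- 		if next in end:
-- 			return sentence[:-(n-1)]+ output
--
-- 	return sentence[:-(n-1)] + output
-- ===== SOURCE B (Python) =====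
-- def finish_sentence(sentence, n, corpus, max_length=15):
--     corpus = [word.lower() for word in corpus]
--     # stage 1: one corpus pass collecting ((n-1)-window, continuation) pairs
--     pairs = [(tuple(corpus[j - n + 1:j]), corpus[j]) for j in range(n, len(corpus) - 1)]
--     # stage 2: group the pairs into per-window ordered counters
--     index = {}
--     for key, w in pairs:
--         c = index.get(key, {})
--         c[w] = c.get(w, 0) + 1
--         index[key] = c
--     # stage 3: reduce each counter to its most frequent word (first-seen wins ties)
--     best = {}
--     for key, c in index.items():
--         top, tf = "", 0
--         for w, f in c.items():
--             if f > tf: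
--                 top, tf = w, f
--         best[key] = top
--     # stage 4: generate by O(1) lookups only
--     gen = []
--     ctx = list(sentence[-(n - 1):])
--     budget = max_length - len(sentence)
--     while budget > 0:
--         w = best.get(tuple(ctx), "")
--         gen.append(w)
--         if w in [".", "!", "?"]:
--             break
--         ctx = ([] if n == 2 else ctx[-(n - 2):]) + [w]
--         budget -= 1
--     return list(sentence) + gen
-- ===== Notes on version B (the rewrite author's own statement) =====
-- stated objective: alternative
-- what changed: A rescans the whole corpus and rebuilds a frequency dict for every generated word; B stages the work once — collect (window, continuation) pairs, group them into per-window counters, reduce each to its most frequent word — and then generates by budget-countdown O(1) lookups, returning sentence + generated suffix; the index trades O(len(corpus)*n) memory for the per-word rescans.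
-- outside the precondition, e.g. on finish_sentence(['a', 'b'], -3, ['x', 'y'], 1): A returns ['a', 'b'], B raises IndexError; on finish_sentence([], -3, ['x', 'y'], 5): A raises IndexError, B raises IndexError
import Mathlib
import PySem

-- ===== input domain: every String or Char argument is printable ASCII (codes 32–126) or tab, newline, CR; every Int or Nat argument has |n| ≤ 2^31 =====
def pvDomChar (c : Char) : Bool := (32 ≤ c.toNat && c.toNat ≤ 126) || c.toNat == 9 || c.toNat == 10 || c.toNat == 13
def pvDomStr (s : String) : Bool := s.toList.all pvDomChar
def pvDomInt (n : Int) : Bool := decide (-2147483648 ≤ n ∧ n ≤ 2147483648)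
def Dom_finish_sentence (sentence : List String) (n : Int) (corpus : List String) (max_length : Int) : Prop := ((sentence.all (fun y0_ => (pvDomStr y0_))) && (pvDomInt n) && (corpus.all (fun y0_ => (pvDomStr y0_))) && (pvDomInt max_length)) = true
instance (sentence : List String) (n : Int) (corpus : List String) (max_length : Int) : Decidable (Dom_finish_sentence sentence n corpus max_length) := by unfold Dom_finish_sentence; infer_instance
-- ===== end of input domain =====

-- B replaces A's per-generated-word corpus rescan by a staged precomputation (pairs → grouped
-- counters → best continuation per window) and a budget-countdown lookup loop (alternative algorithm).

-- ===== PORT A =====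
-- inner 'for i in range(n, len(corpus)-1)' loop building the frequency dict
def fsFreq (pattern : List String) (n : Int) (corpus : List String) : PySem.Dict String Int :=
  (PySem.List.pyRange n (PySem.List.len corpus - 1) 1).foldl
    (fun frequency i =>
      if pattern = PySem.List.slice corpus (some (i - n + 1)) (some i) then
        let next_word := PySem.List.pyGetD corpus i ""
        let frequency := if frequency.contains next_word then frequency else frequency.insert next_word 0
        frequency.modify next_word 0 (· + 1)
      else frequency)
    PySem.Dict.empty

-- 'next = ""; max_freq = 0; for value in frequency.keys(): if frequency[value] > max_freq: ...'
def fsArgmaxKeys (frequency : PySem.Dict String Int) : String :=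
  (frequency.keys.foldl
    (fun acc value => if frequency.getD value 0 > acc.2 then (value, frequency.getD value 0) else acc)
    ("", 0)).1

-- the while loop; fuel = exact number of iterations the length test can still allow
def fsLoopA (n : Int) (corpus : List String) (head : List String) (max_length : Int) :
    Nat → List String → List String → List String
  | 0, _, output => head ++ output
  | fuel + 1, pattern, output =>
    if (output.length : Int) + (head.length : Int) < max_length then
      let next := fsArgmaxKeys (fsFreq pattern n corpus)
      let pattern' := (if n = 2 then ([] : List String) else PySem.List.slice pattern (some (-(n - 2))) none) ++ [next]
      let output' := output ++ [next]
      if next = "." ∨ next = "!" ∨ next = "?" then head ++ output'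
      else fsLoopA n corpus head max_length fuel pattern' output'
    else head ++ output

def finish_sentence (sentence : List String) (n : Int) (corpus : List String) (max_length : Int) : List String :=
  let corpus := corpus.map PySem.Str.lower
  let pattern := PySem.List.slice sentence (some (-(n - 1))) none
  let output := pattern.foldl (fun out item => out ++ [item]) []   -- for item in pattern: output.append(item)
  let head := PySem.List.slice sentence none (some (-(n - 1)))
  fsLoopA n corpus head max_length (max_length - ((output.length : Int) + (head.length : Int))).toNat pattern output

-- ===== PORT B =====
-- stage 1: the comprehension of ((n-1)-window, continuation) pairs, one corpus pass
def fsPairs (n : Int) (corpus : List String) : List (List String × String) :=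
  (PySem.List.pyRange n (PySem.List.len corpus - 1) 1).map
    (fun j => (PySem.List.slice corpus (some (j - n + 1)) (some j), PySem.List.pyGetD corpus j ""))

-- stage 2: 'for key, w in pairs: c = index.get(key, {}); c[w] = c.get(w, 0) + 1; index[key] = c'
def fsIndexB (n : Int) (corpus : List String) : PySem.Dict (List String) (PySem.Dict String Int) :=
  (fsPairs n corpus).foldl
    (fun index kw => index.insert kw.1 ((index.getD kw.1 PySem.Dict.empty).modify kw.2 0 (· + 1)))
    PySem.Dict.empty

-- 'top, tf = "", 0; for w, f in c.items(): if f > tf: top, tf = w, f'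
def fsTop (c : PySem.Dict String Int) : String :=
  (c.items.foldl (fun tf e => if e.2 > tf.2 then (e.1, e.2) else tf) ("", 0)).1

-- stage 3: 'best = {}; for key, c in index.items(): best[key] = top of c'
def fsBest (n : Int) (corpus : List String) : PySem.Dict (List String) String :=
  (fsIndexB n corpus).items.foldl (fun best kc => best.insert kc.1 (fsTop kc.2)) PySem.Dict.empty

-- stage 4: 'while budget > 0: w = best.get(tuple(pattern), ""); gen.append(w); ...; budget -= 1'
-- (the Nat argument is the budget countdown; Python's 'budget = max_length - len(sentence)' with
-- 'while budget > 0' is (max_length - len sentence).toNat steps)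
def fsGen (best : PySem.Dict (List String) String) (n : Int) :
    Nat → List String → List String → List String
  | 0, _, gen => gen
  | budget + 1, ctx, gen =>
    let w := best.getD ctx ""
    if [".", "!", "?"].contains w then gen ++ [w]
    else fsGen best n budget
      ((if n = 2 then ([] : List String) else PySem.List.slice ctx (some (-(n - 2))) none) ++ [w])
      (gen ++ [w])

def finish_sentence_alt (sentence : List String) (n : Int) (corpus : List String) (max_length : Int) : List String :=
  let corpus := corpus.map PySem.Str.lower
  let best := fsBest n corpus
  sentence ++
    fsGen best n (max_length - (sentence.length : Int)).toNat
      (PySem.List.slice sentence (some (-(n - 1))) none) []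

-- ===== PRECONDITION & SPEC =====
-- Pre_ excludes exactly the inputs on which B raises IndexError: the pair-collecting scan
-- range(n, len(corpus)-1) is nonempty with its first index n below -len(corpus), so corpus[n] is
-- out of range; A raises IndexError there too whenever its pattern matches such a window, and
-- otherwise returns while B raises.
def Pre_finish_sentence (sentence : List String) (n : Int) (corpus : List String) (max_length : Int) : Prop :=
  ¬(n < -(corpus.length : Int) ∧ n < (corpus.length : Int) - 1)
instance (sentence : List String) (n : Int) (corpus : List String) (max_length : Int) : Decidable (Pre_finish_sentence sentence n corpus max_length) := by unfold Pre_finish_sentence; infer_instance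
def pvWitness_finish_sentence : List String × Int × List String × Int :=
  (["the", "cat"], 2, ["the", "cat", "sat", "the", "cat", "ran", "."], 8)

def Spec_finish_sentence (sentence : List String) (n : Int) (corpus : List String) (max_length : Int) (out : List String) : Prop := out = finish_sentence_alt sentence n corpus max_length
instance (sentence : List String) (n : Int) (corpus : List String) (max_length : Int) (out : List String) : Decidable (Spec_finish_sentence sentence n corpus max_length out) := by unfold Spec_finish_sentence; infer_instance

-- ===== CLAIM (what is proved, stated in full; the proofs are below) =====
def Claim_equal_finish_sentence : Prop := ∀ (sentence : List String) (n : Int) (corpus : List String) (max_length : Int), Dom_finish_sentence sentence n corpus max_length → Pre_finish_sentence sentence n corpus max_length → Spec_finish_sentence sentence n corpus max_length (finish_sentence sentence n corpus max_length)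

-- ===== LEMMAS AND PROOFS =====

-- the list of continuation words A's scan counts for a given pattern, in scan order
def fsWords (pattern : List String) (n : Int) (corpus : List String) : List String :=
  ((PySem.List.pyRange n (PySem.List.len corpus - 1) 1).filter
      (fun i => decide (pattern = PySem.List.slice corpus (some (i - n + 1)) (some i)))).map
    (fun i => PySem.List.pyGetD corpus i "")

-- A's 'if not in: = 0; += 1' is exactly the counter bump
theorem fs_bumpA_eq (d : PySem.Dict String Int) (w : String) :
    (if d.contains w then d else d.insert w 0).modify w 0 (· + 1) = d.modify w 0 (· + 1) := by
  by_cases h : d.contains w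
  · simp [h]
  · have h' : d.contains w = false := by simpa using h
    have h0 : d.getD w 0 = 0 := by simp [pysem, h']
    simp [h', PySem.Dict.modify, PySem.Dict.getD_insert_self, PySem.Dict.insert_insert_self, h0]

-- a fold whose body fires under a guard is the fold over the filtered, mapped list
theorem fs_foldl_guard {α β γ : Type} (P : α → Prop) [DecidablePred P] (f : α → γ)
    (step : β → γ → β) :
    ∀ (l : List α) (b : β),
      l.foldl (fun b a => if P a then step b (f a) else b) b
        = ((l.filter (fun a => decide (P a))).map f).foldl step b := by
  intro l
  induction l with
  | nil => intro b; rfl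
  | cons a t ih =>
    intro b
    by_cases h : P a <;> simp [h, ih]

theorem fsFreq_eq_counter (pattern : List String) (n : Int) (corpus : List String) :
    fsFreq pattern n corpus = PySem.Dict.counter (fsWords pattern n corpus) := by
  unfold fsFreq fsWords
  simp only [fs_bumpA_eq]
  rw [PySem.Dict.counter_eq_foldl]
  exact fs_foldl_guard (fun i => pattern = PySem.List.slice corpus (some (i - n + 1)) (some i))
    (fun i => PySem.List.pyGetD corpus i "")
    (fun (c : PySem.Dict String Int) (w : String) => c.modify w 0 (· + 1)) _ _

-- the grouped index, looked up at one key, is A's filtered scan for that key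
theorem fs_index_fold_getD (n : Int) (corpus : List String) (p : List String) :
    ∀ (l : List Int) (D : PySem.Dict (List String) (PySem.Dict String Int)),
      (l.foldl (fun counts i =>
          counts.insert (PySem.List.slice corpus (some (i - n + 1)) (some i))
            ((counts.getD (PySem.List.slice corpus (some (i - n + 1)) (some i)) PySem.Dict.empty).modify
              (PySem.List.pyGetD corpus i "") 0 (· + 1))) D).getD p PySem.Dict.empty
        = ((l.filter (fun i => decide (p = PySem.List.slice corpus (some (i - n + 1)) (some i)))).map
            (fun i => PySem.List.pyGetD corpus i "")).foldl
            (fun c w => c.modify w 0 (· + 1)) (D.getD p PySem.Dict.empty) := by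
  intro l
  induction l with
  | nil => intro D; rfl
  | cons i t ih =>
    intro D
    rw [List.foldl_cons, ih, List.filter_cons]
    by_cases h : p = PySem.List.slice corpus (some (i - n + 1)) (some i)
    · rw [← h]
      simp
    · rw [PySem.Dict.getD_insert]
      simp [h]

theorem fsIndexB_getD (n : Int) (corpus : List String) (p : List String) :
    (fsIndexB n corpus).getD p PySem.Dict.empty = PySem.Dict.counter (fsWords p n corpus) := by
  have h := fs_index_fold_getD n corpus p (PySem.List.pyRange n (PySem.List.len corpus - 1) 1)
    PySem.Dict.empty
  rw [PySem.Dict.counter_eq_foldl]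
  unfold fsIndexB fsPairs fsWords
  rw [List.foldl_map]
  simpa [PySem.Dict.getD_empty] using h

theorem fs_get?_eq_lookup {κ ν : Type} [BEq κ] [LawfulBEq κ] (d : PySem.Dict κ ν) (p : κ) :
    d.get? p = List.lookup p d.items := by
  cases d with | mk l =>
    induction l with
    | nil => rfl
    | cons h t ih => cases h with | mk k v =>
        rw [PySem.Dict.get?_mk_cons]
        simp only [List.lookup]
        by_cases hp : p = k
        · subst hp; simp
        · have h1 : (k == p) = false := by simpa using Ne.symm hp
          have h2 : (p == k) = false := by simpa using hp
          rw [h1, h2]; exact ih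

theorem fs_lookup_eq_none {κ ν : Type} [BEq κ] [LawfulBEq κ] (l : List (κ × ν)) (p : κ)
    (h : p ∉ l.map Prod.fst) : List.lookup p l = none := by
  induction l with
  | nil => rfl
  | cons q t ih =>
    simp only [List.map_cons, List.mem_cons, not_or] at h
    simp only [List.lookup]
    have h2 : (p == q.1) = false := by simpa using h.1
    cases q with | mk k v =>
      rw [show ((k,v).fst) = k from rfl] at h2
      rw [h2]
      exact ih h.2

-- B's 'best'-building fold, looked up at p, is the first-match lookup in the items it folds over
theorem fs_best_fold_getD (g : PySem.Dict String Int → String) :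
    ∀ (l : List ((List String) × PySem.Dict String Int)),
      (l.map Prod.fst).Nodup →
      ∀ (B : PySem.Dict (List String) String) (p : List String),
        (l.foldl (fun b q => b.insert q.1 (g q.2)) B).getD p ""
          = match List.lookup p l with
            | some c => g c
            | none => B.getD p "" := by
  intro l
  induction l with
  | nil => intro _ B p; rfl
  | cons q t ih =>
    intro hl B p
    cases q with | mk k c =>
      simp only [List.map_cons, List.nodup_cons] at hl
      simp only [List.foldl_cons, List.lookup]
      rw [ih hl.2]
      by_cases hp : p = k
      · subst hp
        rw [fs_lookup_eq_none t p hl.1]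
        simp [PySem.Dict.getD_insert_self]
      · have h2 : (p == k) = false := by simpa using hp
        rw [h2]
        cases hx : List.lookup p t with
        | some c' => rfl
        | none => rw [PySem.Dict.getD_insert]; simp [hp]

-- on a dict with distinct keys, B's items-fold argmax is A's keys-fold argmax
theorem fsTop_eq_argmaxKeys (c : PySem.Dict String Int) (h : c.keys.Nodup) :
    fsTop c = fsArgmaxKeys c := by
  unfold fsTop fsArgmaxKeys
  rw [PySem.Dict.items_eq_map_keys c h 0, List.foldl_map]

theorem fsIndexB_keys_nodup (n : Int) (corpus : List String) : (fsIndexB n corpus).keys.Nodup := by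
  unfold fsIndexB
  exact PySem.Dict.nodup_keys_foldl_insert_key _ _ _ _ (by simp)

-- the key fact: B's precomputed lookup gives exactly A's rescanned argmax, for EVERY pattern
theorem fs_next_eq (n : Int) (corpus : List String) (p : List String) :
    (fsBest n corpus).getD p "" = fsArgmaxKeys (fsFreq p n corpus) := by
  have hnd : ((fsIndexB n corpus).items.map Prod.fst).Nodup := by
    have := fsIndexB_keys_nodup n corpus
    simpa [PySem.Dict.keys] using this
  unfold fsBest
  rw [fs_best_fold_getD fsTop _ hnd]
  rw [← fs_get?_eq_lookup]
  rw [fsFreq_eq_counter]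
  cases hg : (fsIndexB n corpus).get? p with
  | none =>
    have hd : (fsIndexB n corpus).getD p PySem.Dict.empty = PySem.Dict.empty :=
      PySem.Dict.getD_of_get?_eq_none _ _ hg
    rw [fsIndexB_getD] at hd
    rw [hd]
    rfl
  | some c =>
    have hd : (fsIndexB n corpus).getD p PySem.Dict.empty = c :=
      PySem.Dict.getD_of_get?_eq_some _ _ hg
    rw [fsIndexB_getD] at hd
    rw [← hd]
    exact fsTop_eq_argmaxKeys _ (by rw [← hd] at *; exact PySem.Dict.nodup_keys_counter _)

-- B's while-loop accumulator peels off
theorem fsGen_acc (best : PySem.Dict (List String) String) (n : Int) :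
    ∀ (budget : Nat) (pattern gen : List String),
      fsGen best n budget pattern gen = gen ++ fsGen best n budget pattern [] := by
  intro budget
  induction budget with
  | zero => intro pattern gen; simp [fsGen]
  | succ b ih =>
    intro pattern gen
    simp only [fsGen, List.nil_append]
    split_ifs with h
    · rfl
    all_goals
      rw [ih _ (gen ++ [best.getD pattern ""]), ih _ [best.getD pattern ""]]
      simp

-- B's membership test is A's three-way disjunction
theorem fs_end_test (w : String) :
    ([".", "!", "?"].contains w) = decide (w = "." ∨ w = "!" ∨ w = "?") := by
  by_cases h1 : w = "." <;> by_cases h2 : w = "!" <;> by_cases h3 : w = "?" <;>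
    simp [h1, h2, h3]

-- A's while loop, run with exactly the fuel its length test allows, is sentence-prefix ++ B's
-- budget-countdown generation
theorem fs_loop_eq (n : Int) (corpus head : List String) (max_length : Int) :
    ∀ (fuel : Nat) (pattern output : List String),
      (max_length - ((output.length : Int) + (head.length : Int))).toNat = fuel →
      fsLoopA n corpus head max_length fuel pattern output
        = head ++ output ++ fsGen (fsBest n corpus) n fuel pattern [] := by
  intro fuel
  induction fuel with
  | zero => intro pattern output _; simp [fsLoopA, fsGen]
  | succ fuel ih =>
    intro pattern output hfuel
    have hlt : (output.length : Int) + (head.length : Int) < max_length := by omega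
    simp only [fsLoopA, if_pos hlt]
    rw [show fsArgmaxKeys (fsFreq pattern n corpus) = (fsBest n corpus).getD pattern "" from
      (fs_next_eq n corpus pattern).symm]
    simp only [fsGen, fs_end_test]
    by_cases hw : (fsBest n corpus).getD pattern "" = "." ∨
        (fsBest n corpus).getD pattern "" = "!" ∨ (fsBest n corpus).getD pattern "" = "?"
    · simp [hw]
    · simp only [hw, decide_false, ite_false]
      rw [ih _ (output ++ [(fsBest n corpus).getD pattern ""]) (by simp; omega)]
      rw [fsGen_acc _ _ _ _ ([] ++ _)]
      simp

-- the two slices of A partition the sentence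
theorem fs_slice_partition (xs : List String) (a : Int) :
    PySem.List.slice xs none (some a) ++ PySem.List.slice xs (some a) none = xs := by
  have h1 : PySem.List.slice xs none (some a) = xs.take (PySem.List.clampIdx xs.length a) := rfl
  rw [h1, PySem.List.slice_some_none, List.take_append_drop]

-- ===== VERDICT (by name: the statement is the Claim_ definition above) =====
theorem finish_sentence_spec : Claim_equal_finish_sentence := by
  intro sentence n corpus max_length _ _
  unfold Spec_finish_sentence finish_sentence finish_sentence_alt
  simp only [PySem.List.foldl_append_singleton, List.nil_append]
  have hpart := fs_slice_partition sentence (-(n - 1))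
  have hl2 : (PySem.List.slice sentence none (some (-(n - 1)))).length
      + (PySem.List.slice sentence (some (-(n - 1))) none).length = sentence.length := by
    rw [← List.length_append, hpart]
  have hlen : ((PySem.List.slice sentence (some (-(n - 1))) none).length : Int)
      + ((PySem.List.slice sentence none (some (-(n - 1)))).length : Int)
      = (sentence.length : Int) := by omega
  rw [fs_loop_eq n _ _ max_length _ _ _ rfl, hlen, hpart]
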